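-- pv_equiv track=rewrite | github.com/pypi-data/pypi-mirror-390 | packages/juno-kanban/juno_kanban-1.17.0-py3-none-any.whl/kanban/cli.py | _parse_comma_separated_values
-- ===== SOURCE A (Python) =====
-- from typing import List, Optional, Dict, Any
--
-- def _parse_comma_separated_values(values: Optional[List[str]]) -> Optional[List[str]]:
--     """Parse comma-separated values from argument lists.
--
--     Supports multiple syntaxes:
--     - Space-separated: --status todo done
--     - Comma-separated: --status todo,done
--     - Mixed: --status todo,done archive
--
--     Args:
--         values: List of argument values from argparse (nargs='*')
--
--     Returns:
--         Flattened list of individual values, or None if input is None/empty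
--     """
--     if not values:  # None or empty list
--         return None
--
--     result = []
--     for value in values:
--         # Split on commas, strip whitespace, filter out empty strings
--         parts = [part.strip() for part in value.split(',') if part.strip()]
--         result.extend(parts)
--
--     return result if result else None
-- ===== SOURCE B (Python) =====
-- from typing import List, Optional
--
--
-- def _strip_chars(chars):
--     # manual strip: advance past leading whitespace, retreat past trailing
--     start = 0
--     while start < len(chars) and chars[start].isspace():
--         start += 1
--     end = len(chars)
--     while end > start and chars[end - 1].isspace():
--         end -= 1
--     return chars[start:end]
--
--
-- def _parse_comma_separated_values(values: Optional[List[str]]) -> Optional[List[str]]: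
--     if not values:
--         return None
--     result = []
--     for value in values:
--         buf = []
--         for ch in value:
--             if ch == ',':
--                 tok = _strip_chars(buf)
--                 if tok:
--                     result.append(''.join(tok))
--                 buf = []
--             else:
--                 buf.append(ch)
--         tok = _strip_chars(buf)
--         if tok:
--             result.append(''.join(tok))
--     return result if result else None
-- ===== Notes on version B (the rewrite author's own statement) =====
-- stated objective: alternative
-- what changed: Replaces A's per-value split(',')/strip comprehension pipeline with a single character-level scanner that walks each string once, accumulating a buffer and flushing a manually-trimmed token at each comma and at end of string; no split or strip library calls.
import Mathlib
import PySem

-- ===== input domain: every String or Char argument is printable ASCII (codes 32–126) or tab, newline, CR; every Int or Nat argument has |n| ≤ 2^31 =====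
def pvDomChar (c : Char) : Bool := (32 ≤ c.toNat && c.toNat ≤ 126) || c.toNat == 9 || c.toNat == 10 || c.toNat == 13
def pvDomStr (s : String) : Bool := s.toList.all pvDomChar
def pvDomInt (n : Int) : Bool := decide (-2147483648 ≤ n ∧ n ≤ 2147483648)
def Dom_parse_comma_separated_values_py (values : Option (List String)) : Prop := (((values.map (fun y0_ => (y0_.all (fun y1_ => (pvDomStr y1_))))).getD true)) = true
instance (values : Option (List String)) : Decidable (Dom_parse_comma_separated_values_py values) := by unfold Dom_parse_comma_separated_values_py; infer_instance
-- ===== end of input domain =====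

-- B replaces A's per-value split(',')/strip/filter comprehension with a single character-level scanner (buffer + flush with a manual trim); objective: alternative.


-- ===== PORT A =====
-- value.split(',') with the literal nonempty separator ',' never raises, ported as Chars.splitOn on the char list;
-- [part.strip() for part in … if part.strip()] is map-strip-then-keep-nonempty in the same order.
def parse_comma_separated_values_py (values : Option (List String)) : Option (List String) :=
  match values with
  | none => none
  | some vs =>
    if vs = [] then none    -- 'if not values'
    else
      let result := vs.foldl (fun acc v =>
        acc ++ (((PySem.Chars.splitOn v.toList [',']).map PySem.Chars.strip).filter
          (fun p => p ≠ [])).map String.ofList) []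
      if result = [] then none else some result

-- ===== PORT B =====
-- _strip_chars: the first while loop drops leading whitespace (dropWhile), the second drops
-- trailing whitespace (dropWhile on the reverse); exact transcription of the index arithmetic.
def pvStripChars (cs : List Char) : List Char :=
  ((cs.dropWhile PySem.Chars.isspace).reverse.dropWhile PySem.Chars.isspace).reverse

-- 'tok = _strip_chars(buf); if tok: result.append(''.join(tok))'
def pvFlush (buf : List Char) (res : List String) : List String :=
  let tok := pvStripChars buf
  if tok = [] then res else res ++ [String.ofList tok]

-- the inner 'for ch in value' loop with its (buf, result) state; final flush after the loop
def pvScan : List Char → List Char → List String → List String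
  | [], buf, res => pvFlush buf res
  | c :: rest, buf, res =>
      if c = ',' then pvScan rest [] (pvFlush buf res)
      else pvScan rest (buf ++ [c]) res

def parse_comma_separated_values_py_alt (values : Option (List String)) : Option (List String) :=
  match values with
  | none => none
  | some vs =>
    if vs = [] then none    -- 'if not values'
    else
      let result := vs.foldl (fun res v => pvScan v.toList [] res) []
      if result = [] then none else some result

-- ===== PRECONDITION & SPEC =====
def Spec_parse_comma_separated_values_py (values : Option (List String)) (out : Option (List String)) : Prop := out = parse_comma_separated_values_py_alt values
instance (values : Option (List String)) (out : Option (List String)) : Decidable (Spec_parse_comma_separated_values_py values out) := by unfold Spec_parse_comma_separated_values_py; infer_instance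

-- ===== CLAIM (what is proved, stated in full; the proofs are below) =====
def Claim_equal_parse_comma_separated_values_py : Prop := ∀ (values : Option (List String)), Dom_parse_comma_separated_values_py values → Spec_parse_comma_separated_values_py values (parse_comma_separated_values_py values)

-- ===== LEMMAS AND PROOFS =====

-- Simple structural recursion computing split on the single character ','.
def pvSplitChar : List Char → List (List Char)
  | [] => [[]]
  | c :: rest =>
    if c = ',' then [] :: pvSplitChar rest
    else match pvSplitChar rest with
      | [] => [[c]]
      | h :: t => (c :: h) :: t

theorem pvSplitChar_ne_nil (l : List Char) : pvSplitChar l ≠ [] := by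
  cases l with
  | nil => simp [pvSplitChar]
  | cons c rest =>
    simp only [pvSplitChar]
    split
    · simp
    · rcases pvSplitChar rest with _ | ⟨h0, t⟩ <;> simp

-- apply f to the head only
def pvMapHd (f : List Char → List Char) : List (List Char) → List (List Char)
  | [] => []
  | h :: t => f h :: t

theorem pvGo_spec (fuel : Nat) : ∀ (l cur : List Char) (acc : List (List Char)),
    l.length < fuel →
    PySem.Chars.splitOn.go [','] fuel l cur acc
      = acc.reverse ++ pvMapHd (fun h => cur.reverse ++ h) (pvSplitChar l) := by
  induction fuel with
  | zero => intro l cur acc h; omega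
  | succ fuel ih =>
    intro l cur acc h
    cases l with
    | nil => simp [PySem.Chars.splitOn.go, pvSplitChar, pvMapHd]
    | cons c rest =>
      have hpre : [','].isPrefixOf (c :: rest) = (',' == c) := by
        simp [List.isPrefixOf]
      by_cases hc : c = ','
      · subst hc
        simp only [PySem.Chars.splitOn.go, hpre, beq_self_eq_true, if_true, List.drop_succ_cons,
          List.length_singleton, List.drop_zero]
        rw [ih rest [] ((cur.reverse) :: acc) (by simpa using Nat.lt_of_succ_lt_succ h)]
        rcases hsc : pvSplitChar rest with _ | ⟨hdp, tl⟩
        · exact absurd hsc (pvSplitChar_ne_nil rest)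
        · simp [pvSplitChar, pvMapHd, hsc]
      · have hcb : (',' == c) = false := by
          simp only [beq_eq_false_iff_ne, ne_eq]
          exact fun e => hc e.symm
        simp only [PySem.Chars.splitOn.go, hpre, hcb, Bool.false_eq_true, if_false]
        rw [ih rest (c :: cur) acc (by simpa using Nat.lt_of_succ_lt_succ h)]
        rcases hsc : pvSplitChar rest with _ | ⟨hdp, tl⟩
        · exact absurd hsc (pvSplitChar_ne_nil rest)
        · simp [pvSplitChar, hc, pvMapHd, hsc]

theorem pvSplitOn_eq (l : List Char) : PySem.Chars.splitOn l [','] = pvSplitChar l := by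
  rw [show PySem.Chars.splitOn l [','] = PySem.Chars.splitOn.go [','] (l.length + 1) l [] [] from rfl,
    pvGo_spec (l.length + 1) l [] [] (Nat.lt_succ_self _)]
  cases hsc : pvSplitChar l with
  | nil => exact absurd hsc (pvSplitChar_ne_nil l)
  | cons hdp tl => simp [pvMapHd]

-- B's manual trim IS PySem.Chars.strip (dropWhile front, dropWhile on the reverse)
theorem pvStripChars_eq (cs : List Char) : pvStripChars cs = PySem.Chars.strip cs := rfl

-- the tokens contributed by one chunk list (strip each, keep nonempty, in order)
def pvTokOf (chunks : List (List Char)) : List String :=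
  ((chunks.map PySem.Chars.strip).filter (fun p => p ≠ [])).map String.ofList

-- the scanner over l with pending buffer buf appends exactly the tokens of buf-prefixed chunks
theorem pvScan_spec : ∀ (l buf : List Char) (res : List String),
    pvScan l buf res = res ++ pvTokOf (pvMapHd (fun h => buf ++ h) (pvSplitChar l)) := by
  intro l
  induction l with
  | nil =>
    intro buf res
    simp only [pvScan, pvFlush, pvSplitChar, pvMapHd, pvTokOf, List.map_cons, List.map_nil,
      pvStripChars_eq, List.append_nil]
    by_cases h : PySem.Chars.strip buf = [] <;> simp [h]
  | cons c rest ih =>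
    intro buf res
    by_cases hc : c = ','
    · subst hc
      simp only [pvScan, if_pos rfl, pvSplitChar, pvMapHd]
      rw [ih [] (pvFlush buf res)]
      have hid : pvMapHd (fun h => [] ++ h) (pvSplitChar rest) = pvSplitChar rest := by
        cases pvSplitChar rest <;> simp [pvMapHd]
      rw [hid]
      simp only [pvFlush, pvStripChars_eq, pvTokOf]
      by_cases h : PySem.Chars.strip buf = [] <;> simp [h]
    · simp only [pvScan, pvSplitChar, if_neg hc]
      rw [ih (buf ++ [c]) res]
      rcases hsc : pvSplitChar rest with _ | ⟨hdp, tl⟩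
      · exact absurd hsc (pvSplitChar_ne_nil rest)
      · simp [pvMapHd, List.append_assoc]

-- both folds append, per value, the same token list; flatten them
theorem pvFoldAppend (g : String → List String) (vs : List String) :
    ∀ acc, vs.foldl (fun acc v => acc ++ g v) acc = acc ++ (vs.map g).flatten := by
  induction vs with
  | nil => intro acc; simp
  | cons v vs ih => intro acc; simp [List.foldl_cons, ih, List.append_assoc]

theorem pvFoldScan (vs : List String) :
    ∀ acc, vs.foldl (fun res v => pvScan v.toList [] res) acc
      = acc ++ (vs.map (fun v => pvTokOf (pvSplitChar v.toList))).flatten := by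
  induction vs with
  | nil => intro acc; simp
  | cons v vs ih =>
    intro acc
    simp only [List.foldl_cons, ih, List.map_cons, List.flatten_cons]
    rw [pvScan_spec]
    have hid : pvMapHd (fun h => [] ++ h) (pvSplitChar v.toList) = pvSplitChar v.toList := by
      cases pvSplitChar v.toList <;> simp [pvMapHd]
    rw [hid, List.append_assoc]

-- ===== VERDICT (by name: the statement is the Claim_ definition above) =====
theorem parse_comma_separated_values_py_spec : Claim_equal_parse_comma_separated_values_py := by
  intro values _
  unfold Spec_parse_comma_separated_values_py parse_comma_separated_values_py parse_comma_separated_values_py_alt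
  cases values with
  | none => rfl
  | some vs =>
    by_cases hvs : vs = []
    · simp [hvs]
    · simp only [hvs, if_false]
      have hA : vs.foldl (fun acc v =>
          acc ++ (((PySem.Chars.splitOn v.toList [',']).map PySem.Chars.strip).filter
            (fun p => p ≠ [])).map String.ofList) []
          = (vs.map (fun v => pvTokOf (pvSplitChar v.toList))).flatten := by
        rw [pvFoldAppend (fun v => (((PySem.Chars.splitOn v.toList [',']).map PySem.Chars.strip).filter
          (fun p => p ≠ [])).map String.ofList) vs []]
        simp only [List.nil_append]
        have hmap : vs.map (fun v => (((PySem.Chars.splitOn v.toList [',']).map PySem.Chars.strip).filter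
            (fun p => p ≠ [])).map String.ofList) = vs.map (fun v => pvTokOf (pvSplitChar v.toList)) :=
          List.map_congr_left (fun v _ => by simp only [pvTokOf]; rw [pvSplitOn_eq])
        rw [hmap]
      have hB : vs.foldl (fun res v => pvScan v.toList [] res) []
          = (vs.map (fun v => pvTokOf (pvSplitChar v.toList))).flatten := by
        rw [pvFoldScan vs []]; simp
      rw [hA, hB]
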